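-- pv_equiv track=rewrite | github.com/rjorton/SeqFeats | seqfeats_cai.py | replace_ambiguities
-- ===== SOURCE A (Python) =====
-- def replace_ambiguities(seq):
--     seq = seq.upper()
--     base_dict = ["A", "C", "G", "T", "U", "N", "-"]
--     no_amb_seq = ''
--
--     for base in seq:
--         if base in base_dict:
--             no_amb_seq += base
--         else:
--             no_amb_seq += 'N'
--
--     return no_amb_seq
-- ===== SOURCE B (Python) =====
-- import re
--
--
-- def replace_ambiguities(seq):
--     return re.sub(r'[^ACGTUN-]', 'N', seq.upper())
-- ===== Notes on version B (the rewrite author's own statement) =====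
-- stated objective: idiomatic
-- what changed: Replaces the explicit per-character loop with string accumulator and list-membership branch by a single regex substitution over a negated character class on the uppercased input.
import Mathlib
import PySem

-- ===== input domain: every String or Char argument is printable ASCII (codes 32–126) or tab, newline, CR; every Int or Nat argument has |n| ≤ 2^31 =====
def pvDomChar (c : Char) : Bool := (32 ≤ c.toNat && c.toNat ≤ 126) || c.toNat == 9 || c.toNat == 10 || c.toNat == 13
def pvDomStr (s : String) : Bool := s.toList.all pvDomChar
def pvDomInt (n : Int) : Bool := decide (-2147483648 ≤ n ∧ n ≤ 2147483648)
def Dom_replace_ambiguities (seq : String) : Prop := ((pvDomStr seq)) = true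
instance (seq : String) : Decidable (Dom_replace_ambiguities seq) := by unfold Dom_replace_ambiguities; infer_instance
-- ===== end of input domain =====

-- B replaces A's explicit per-character loop (string accumulator + list-membership branch)
-- by a single regex substitution re.sub(r'[^ACGTUN-]', 'N', seq.upper()); idiomatic, same result.

-- ===== PORT A =====
-- A: uppercase, then loop over characters, appending the base if it is in the
-- list ["A","C","G","T","U","N","-"] (Python compares 1-char strings), else 'N'.
def replace_ambiguities (seq : String) : String :=
  let s := PySem.Str.upper seq
  let base_dict : List String := ["A", "C", "G", "T", "U", "N", "-"]
  let no_amb_seq : List Char :=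
    s.toList.foldl (fun acc base =>
      if base_dict.contains (String.ofList [base]) then acc ++ [base] else acc ++ ['N']) []
  String.ofList no_amb_seq

-- ===== PORT B =====
-- B: re.sub(r'[^ACGTUN-]', 'N', seq.upper()). The pattern is a single-character
-- negated class, so the substitution is exactly a character-wise map: every
-- character outside the class becomes 'N'. Ported exactly as that map.
def pvRegexClassB (c : Char) : Bool :=
  c == 'A' || c == 'C' || c == 'G' || c == 'T' || c == 'U' || c == 'N' || c == '-'

def replace_ambiguities_alt (seq : String) : String :=
  String.ofList ((PySem.Str.upper seq).toList.map (fun c => if pvRegexClassB c then c else 'N'))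

-- ===== PRECONDITION & SPEC =====
def Spec_replace_ambiguities (seq : String) (out : String) : Prop := out = replace_ambiguities_alt seq
instance (seq : String) (out : String) : Decidable (Spec_replace_ambiguities seq out) := by unfold Spec_replace_ambiguities; infer_instance

-- ===== CLAIM (what is proved, stated in full; the proofs are below) =====
def Claim_equal_replace_ambiguities : Prop := ∀ (seq : String), Dom_replace_ambiguities seq → Spec_replace_ambiguities seq (replace_ambiguities seq)

-- ===== LEMMAS AND PROOFS =====

-- A's membership test on the 1-char string equals B's character-class predicate.
theorem pv_contains_eq_class (c : Char) :
    (["A", "C", "G", "T", "U", "N", "-"] : List String).contains (String.ofList [c])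
      = pvRegexClassB c := by
  rw [Bool.eq_iff_iff]
  simp only [List.contains_cons, List.contains_nil, Bool.or_eq_true, beq_iff_eq,
    pvRegexClassB, String.ext_iff]
  simp
  tauto

-- A's accumulator loop equals append of the mapped tail.
theorem pv_foldl_eq_map (l acc : List Char) :
    l.foldl (fun acc base =>
        if (["A", "C", "G", "T", "U", "N", "-"] : List String).contains (String.ofList [base])
        then acc ++ [base] else acc ++ ['N']) acc
      = acc ++ l.map (fun c => if pvRegexClassB c then c else 'N') := by
  induction l generalizing acc with
  | nil => simp
  | cons h t ih =>
    rw [List.foldl_cons, ih, pv_contains_eq_class]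
    by_cases hc : pvRegexClassB h <;> simp [hc]

-- ===== VERDICT (by name: the statement is the Claim_ definition above) =====
theorem replace_ambiguities_spec : Claim_equal_replace_ambiguities := by
  intro seq _
  simp only [Spec_replace_ambiguities, replace_ambiguities, replace_ambiguities_alt]
  rw [pv_foldl_eq_map]
  simp
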